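-- pv_equiv track=rewrite | github.com/lpulidoa/KeepYaSecret | Kasiski_test.py | gcd_counts
-- ===== SOURCE A (Python) =====
-- def gcd(a, b):
--     while b:
--         a, b = b, a % b
--     return a
--
-- def gcd_counts(numbers, gcd_dict):
--     for i in range(len(numbers)):
--         for j in range(i + 1, len(numbers)):
--             common_divisor = gcd(numbers[i], numbers[j])
--
--             if common_divisor not in gcd_dict:
--                 gcd_dict[common_divisor] = 1
--             else:
--                 gcd_dict[common_divisor] += 1
--
--     return gcd_dict
-- ===== SOURCE B (Python) =====
-- def gcd_counts(numbers, gcd_dict):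
--     def euclid(a, b):
--         return a if b == 0 else euclid(b, a - b * (a // b))
--
--     cache = {}
--     inc = {}
--     for i, x in enumerate(numbers):
--         for y in numbers[i + 1:]:
--             if (x, y) in cache:
--                 g = cache[(x, y)]
--             else:
--                 g = euclid(x, y)
--                 cache[(x, y)] = g
--             inc[g] = inc.get(g, 0) + 1
--     for g, c in inc.items():
--         gcd_dict[g] = gcd_dict.get(g, 0) + c
--     return gcd_dict
-- ===== Notes on version B (the rewrite author's own statement) =====
-- stated objective: alternative
-- what changed: B replaces A's per-pair dict updates with a memoised gcd cache keyed by the value pair (each distinct ordered value pair's gcd is computed once), a recursive Euclid using a - b*(a//b), and a separate increment counter that is merged into gcd_dict in one final pass.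
import Mathlib
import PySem

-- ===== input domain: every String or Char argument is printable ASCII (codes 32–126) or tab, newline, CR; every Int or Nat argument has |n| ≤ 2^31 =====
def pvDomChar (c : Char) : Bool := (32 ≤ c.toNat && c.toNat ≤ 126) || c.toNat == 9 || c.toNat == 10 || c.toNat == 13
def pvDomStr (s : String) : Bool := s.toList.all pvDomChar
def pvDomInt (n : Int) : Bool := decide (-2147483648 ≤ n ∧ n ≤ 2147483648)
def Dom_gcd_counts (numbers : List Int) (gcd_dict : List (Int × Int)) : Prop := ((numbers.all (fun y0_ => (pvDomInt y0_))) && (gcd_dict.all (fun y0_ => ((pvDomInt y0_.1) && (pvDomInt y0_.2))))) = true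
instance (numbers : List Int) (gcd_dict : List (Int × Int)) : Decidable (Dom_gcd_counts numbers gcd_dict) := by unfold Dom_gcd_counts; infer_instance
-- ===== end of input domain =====

-- B replaces A's per-pair dict updates by a memoised gcd cache over value pairs plus a separate
-- increment counter merged into gcd_dict at the end (objective: alternative; A and B both mutate
-- gcd_dict in place in Python — the equivalence proved here is about the returned value).

-- Python floor-mod shrinks |·|: needed by both ports' termination (cited by decreasing_by).
lemma pvModNatAbsLt (a b : Int) (hb : ¬ b = 0) : (PySem.Int.mod a b).natAbs < b.natAbs := by
  rcases lt_or_gt_of_ne hb with h | h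
  · have := PySem.Int.mod_neg_bounds a h
    omega
  · have h1 := PySem.Int.mod_nonneg a h
    have h2 := PySem.Int.mod_lt a h
    omega

-- a - b*(a//b) is a % b: needed by gcdB's termination (cited by decreasing_by).
lemma pvSubFloordivEqMod (a b : Int) : a - b * PySem.Int.floordiv a b = PySem.Int.mod a b := by
  have := PySem.Int.floordiv_mul_add_mod a b
  linarith

-- ===== PORT A =====
-- A's helper gcd: while b: a, b = b, a % b; return a
def gcdA (a b : Int) : Int :=
  if h : b = 0 then a else gcdA b (PySem.Int.mod a b)
termination_by b.natAbs
decreasing_by exact pvModNatAbsLt a b h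

def gcd_counts (numbers : List Int) (gcd_dict : List (Int × Int)) : List (Int × Int) :=
  ((PySem.List.pyRange 0 (numbers.length : Int) 1).foldl (fun d i =>
      (PySem.List.pyRange (i + 1) (numbers.length : Int) 1).foldl (fun d j =>
        let g := gcdA (PySem.List.pyGetD numbers i 0) (PySem.List.pyGetD numbers j 0)
        if d.contains g then d.insert g (d.getD g 0 + 1) else d.insert g 1) d)
    (PySem.Dict.ofList gcd_dict)).items

-- ===== PORT B =====
-- B's helper euclid: recursive, with a - b*(a//b) in place of %
def gcdB (a b : Int) : Int :=
  if h : b = 0 then a else gcdB b (a - b * PySem.Int.floordiv a b)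
termination_by b.natAbs
decreasing_by rw [pvSubFloordivEqMod]; exact pvModNatAbsLt a b h

def gcd_counts_alt (numbers : List Int) (gcd_dict : List (Int × Int)) : List (Int × Int) :=
  let st := (PySem.List.enumerate numbers 0).foldl (fun st p =>
      (PySem.List.slice numbers (some (p.1 + 1)) none).foldl (fun st y =>
        if st.1.contains (p.2, y) then
          let g := st.1.getD (p.2, y) 0
          (st.1, st.2.insert g (st.2.getD g 0 + 1))
        else
          let g := gcdB p.2 y
          (st.1.insert (p.2, y) g, st.2.insert g (st.2.getD g 0 + 1))) st)
    ((PySem.Dict.empty : PySem.Dict (Int × Int) Int), (PySem.Dict.empty : PySem.Dict Int Int))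
  (st.2.items.foldl (fun d pc => d.insert pc.1 (d.getD pc.1 0 + pc.2))
    (PySem.Dict.ofList gcd_dict)).items

-- ===== PRECONDITION & SPEC =====
def Spec_gcd_counts (numbers : List Int) (gcd_dict : List (Int × Int)) (out : List (Int × Int)) : Prop := out = gcd_counts_alt numbers gcd_dict
instance (numbers : List Int) (gcd_dict : List (Int × Int)) (out : List (Int × Int)) : Decidable (Spec_gcd_counts numbers gcd_dict out) := by unfold Spec_gcd_counts; infer_instance

-- ===== CLAIM (what is proved, stated in full; the proofs are below) =====
def Claim_equal_gcd_counts : Prop := ∀ (numbers : List Int) (gcd_dict : List (Int × Int)), Dom_gcd_counts numbers gcd_dict → Spec_gcd_counts numbers gcd_dict (gcd_counts numbers gcd_dict)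

-- ===== LEMMAS AND PROOFS =====

lemma gcdA_eq_gcdB (a b : Int) : gcdA a b = gcdB a b := by
  fun_induction gcdA a b <;> rw [gcdB] <;> simp_all [pvSubFloordivEqMod]

-- the common dict-update step ('d[g] = d.get(g, 0) + 1')
def istep (d : PySem.Dict Int Int) (g : Int) : PySem.Dict Int Int := d.insert g (d.getD g 0 + 1)

-- B's merge step ('gcd_dict[g] = gcd_dict.get(g, 0) + c')
def mstep (d : PySem.Dict Int Int) (pc : Int × Int) : PySem.Dict Int Int := d.insert pc.1 (d.getD pc.1 0 + pc.2)

-- B's inner-loop body on the flattened pair stream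
def bstep (st : PySem.Dict (Int × Int) Int × PySem.Dict Int Int) (q : Int × Int) :
    PySem.Dict (Int × Int) Int × PySem.Dict Int Int :=
  if st.1.contains q then
    let g := st.1.getD q 0
    (st.1, st.2.insert g (st.2.getD g 0 + 1))
  else
    let g := gcdB q.1 q.2
    (st.1.insert q g, st.2.insert g (st.2.getD g 0 + 1))

-- the ordered pair stream both programs traverse
def pairsA (numbers : List Int) : List (Int × Int) :=
  (PySem.List.pyRange 0 (numbers.length : Int) 1).flatMap (fun i =>
    (PySem.List.pyRange (i + 1) (numbers.length : Int) 1).map (fun j =>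
      (PySem.List.pyGetD numbers i 0, PySem.List.pyGetD numbers j 0)))

def pairsB (numbers : List Int) : List (Int × Int) :=
  (PySem.List.enumerate numbers 0).flatMap (fun p =>
    (PySem.List.slice numbers (some (p.1 + 1)) none).map (fun y => (p.2, y)))

lemma gcd_counts_eq_foldl (numbers : List Int) (gcd_dict : List (Int × Int)) :
    gcd_counts numbers gcd_dict =
      (((pairsA numbers).map (fun p => gcdA p.1 p.2)).foldl istep (PySem.Dict.ofList gcd_dict)).items := by
  have h1 : (pairsA numbers).map (fun p => gcdA p.1 p.2)
      = (PySem.List.pyRange 0 (numbers.length : Int) 1).flatMap (fun i =>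
          (PySem.List.pyRange (i + 1) (numbers.length : Int) 1).map (fun j =>
            gcdA (PySem.List.pyGetD numbers i 0) (PySem.List.pyGetD numbers j 0))) := by
    rw [pairsA, List.map_flatMap]
    simp only [List.map_map]
    rfl
  rw [h1, List.foldl_flatMap]
  unfold gcd_counts
  congr 1
  apply PySem.List.foldl_congr_mem
  intro acc i _
  rw [List.foldl_map]
  apply PySem.List.foldl_congr_mem
  intro d j _
  by_cases hc : d.contains (gcdA (PySem.List.pyGetD numbers i 0) (PySem.List.pyGetD numbers j 0))
  · simp [istep, hc]
  · have h0 := PySem.Dict.getD_of_not_contains (d := d)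
      (k := gcdA (PySem.List.pyGetD numbers i 0) (PySem.List.pyGetD numbers j 0)) (d0 := (0 : Int))
      (by simpa using hc)
    simp [istep, hc, h0]

lemma bstep_loop (ps : List (Int × Int)) (cache : PySem.Dict (Int × Int) Int)
    (inc : PySem.Dict Int Int)
    (hinv : ∀ q ∈ cache.items, q.2 = gcdB q.1.1 q.1.2) :
    (ps.foldl bstep (cache, inc)).2 = (ps.map (fun p => gcdB p.1 p.2)).foldl istep inc := by
  induction ps generalizing cache inc with
  | nil => rfl
  | cons q t ih =>
    simp only [List.foldl_cons, List.map_cons]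
    by_cases hc : cache.contains q
    · have hsome : (cache.get? q).isSome := by
        rw [← PySem.Dict.contains_eq_isSome_get?]; exact hc
      obtain ⟨v, hv⟩ := Option.isSome_iff_exists.mp hsome
      have hg : cache.getD q 0 = gcdB q.1 q.2 := by
        rw [PySem.Dict.getD_of_get?_eq_some cache 0 hv]
        exact hinv (q, v) (PySem.Dict.mem_items_of_get?_eq_some cache hv)
      have hb : bstep (cache, inc) q = (cache, istep inc (gcdB q.1 q.2)) := by
        simp [bstep, hc, hg, istep]
      rw [hb, ih cache _ hinv]
    · have hb : bstep (cache, inc) q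
          = (cache.insert q (gcdB q.1 q.2), istep inc (gcdB q.1 q.2)) := by
        simp [bstep, hc, istep]
      rw [hb, ih _ _ ?_]
      intro r hr
      rcases (PySem.Dict.mem_items_insert _ _ _ r).mp hr with h1 | h2
      · subst h1; rfl
      · exact hinv r h2.1

lemma gcd_counts_alt_eq_foldl (numbers : List Int) (gcd_dict : List (Int × Int)) :
    gcd_counts_alt numbers gcd_dict =
      ((((pairsB numbers).map (fun p => gcdB p.1 p.2)).foldl istep PySem.Dict.empty).items.foldl
        mstep (PySem.Dict.ofList gcd_dict)).items := by
  have hp : (pairsB numbers).foldl bstep (((PySem.Dict.empty : PySem.Dict (Int × Int) Int),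
        (PySem.Dict.empty : PySem.Dict Int Int)))
      = (PySem.List.enumerate numbers 0).foldl (fun st p =>
          (PySem.List.slice numbers (some (p.1 + 1)) none).foldl
            (fun st y => bstep st (p.2, y)) st)
        ((PySem.Dict.empty : PySem.Dict (Int × Int) Int), (PySem.Dict.empty : PySem.Dict Int Int)) := by
    unfold pairsB
    rw [List.foldl_flatMap]
    simp only [List.foldl_map]
  rw [← bstep_loop (pairsB numbers) PySem.Dict.empty PySem.Dict.empty
    (by intro q hq; simp [PySem.Dict.empty] at hq)]
  rw [hp]
  rfl

lemma map_pyGetD_pyRange_drop (numbers : List Int) (a : Int) (ha : 0 ≤ a) :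
    (PySem.List.pyRange a (numbers.length : Int) 1).map (fun j => PySem.List.pyGetD numbers j 0) =
      numbers.drop a.toNat := by
  apply List.ext_getElem
  · simp only [List.length_map, PySem.List.length_pyRange_one, List.length_drop]
    omega
  intro i h1 h2
  simp only [List.length_map, PySem.List.length_pyRange_one] at h1
  simp only [List.getElem_map, PySem.List.getElem_pyRange_one, List.getElem_drop]
  rw [PySem.List.pyGetD_eq_getElem numbers 0 (by omega) (by omega)]
  simp only [show (a + (i : Int)).toNat = a.toNat + i from by omega]

lemma pairsB_eq_pairsA (numbers : List Int) : pairsB numbers = pairsA numbers := by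
  unfold pairsB pairsA
  rw [PySem.List.enumerate_eq_map_pyRange (d := 0), List.flatMap_map]
  apply List.flatMap_congr
  intro i hi
  rcases PySem.List.mem_pyRange_one.mp hi with ⟨h0, hn⟩
  have hs : PySem.List.slice numbers (some (i + 1)) none = numbers.drop (i + 1).toNat :=
    PySem.List.slice_from numbers (by omega)
  dsimp only
  rw [hs, ← map_pyGetD_pyRange_drop numbers (i + 1) (by omega), List.map_map]
  rfl

lemma set_update_ofList {α : Type} [BEq α] [LawfulBEq α] (s : PySem.Set α) (l : List α) :
    PySem.Set.update s (PySem.Set.ofList l) = PySem.Set.update s l := by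
  induction l using List.reverseRecOn with
  | nil => rfl
  | append_singleton t x ih =>
    have hof : PySem.Set.ofList (t ++ [x]) = PySem.Set.add (PySem.Set.ofList t) x := by
      rw [PySem.Set.ofList_eq_foldl, PySem.Set.ofList_eq_foldl, List.foldl_append]
      rfl
    rw [hof, PySem.Set.update_append, PySem.Set.update_cons, PySem.Set.update_nil]
    by_cases hx : x ∈ PySem.Set.ofList t
    · rw [PySem.Set.add_of_mem hx, ih,
        PySem.Set.add_of_mem ((PySem.Set.mem_update _ _ _).mpr (Or.inr ((PySem.Set.mem_ofList _ _).mp hx)))]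
    · rw [PySem.Set.add_of_not_mem hx, PySem.Set.update_append, PySem.Set.update_cons,
        PySem.Set.update_nil, ih]

lemma filter_beq_of_nodup (l : List Int) (k : Int) (h : l.Nodup) :
    l.filter (fun x => x == k) = if k ∈ l then [k] else [] := by
  induction l with
  | nil => simp
  | cons a t ih =>
    rcases List.nodup_cons.mp h with ⟨ha, ht⟩
    by_cases hk : a = k
    · subst hk
      have hfil : t.filter (fun x => x == a) = [] :=
        List.filter_eq_nil_iff.mpr (fun x hx => by
          simp only [beq_iff_eq]
          intro h'
          exact ha (h' ▸ hx))
      simp [hfil]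
    · simp [hk, ih ht, Ne.symm hk]

lemma merge_getD (ps : List (Int × Int)) (d : PySem.Dict Int Int) (k : Int)
    (h : (ps.map Prod.fst).Nodup) :
    (ps.foldl mstep d).getD k 0 = d.getD k 0 + ((ps.filter (fun p => p.1 == k)).map Prod.snd).sum := by
  induction ps generalizing d with
  | nil => simp
  | cons p t ih =>
    obtain ⟨a, v⟩ := p
    simp only [List.map_cons, List.nodup_cons] at h
    obtain ⟨ha, ht⟩ := h
    simp only [List.foldl_cons, List.filter_cons]
    by_cases hk : a = k
    · subst hk
      have hfil : t.filter (fun p => p.1 == a) = [] :=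
        List.filter_eq_nil_iff.mpr (fun q hq => by
          simp only [beq_iff_eq]
          intro h'
          exact ha (h' ▸ List.mem_map_of_mem (f := Prod.fst) hq))
      rw [ih _ ht, hfil]
      simp [mstep, PySem.Dict.getD_insert_self]
    · rw [ih _ ht]
      have : (mstep d (a, v)).getD k 0 = d.getD k 0 := by
        simp only [mstep]
        exact PySem.Dict.getD_insert_of_ne d _ _ (fun h' => hk h'.symm)
      simp [this, hk]

lemma items_eq_keys_map (d : PySem.Dict Int Int) (h : d.keys.Nodup) :
    d.items = d.keys.map (fun k => (k, d.getD k 0)) := by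
  apply List.ext_getElem
  · simp [PySem.Dict.keys]
  intro i h1 h2
  simp only [List.getElem_map]
  have hlen : i < d.keys.length := by simpa [PySem.Dict.keys] using h1
  have hk : d.keys[i]'hlen = d.items[i].1 := by
    simp [PySem.Dict.keys]
  rw [hk]
  have hmem : (d.items[i].1, d.items[i].2) ∈ d.items := by
    simp
  have hv := PySem.Dict.getD_of_mem_items d hmem h 0
  rw [hv]

-- the heart: per-element counting equals counting once and merging
lemma foldl_istep_eq_merge_counter (gs : List Int) (d0 : PySem.Dict Int Int) (h : d0.keys.Nodup) :
    gs.foldl istep d0 = (PySem.Dict.counter gs).items.foldl mstep d0 := by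
  have hnodL : (gs.foldl istep d0).keys.Nodup := by
    show (gs.foldl (fun d g => d.insert g (d.getD g 0 + 1)) d0).keys.Nodup
    exact PySem.Dict.nodup_keys_foldl_insert _ _ _ h
  have hcfst : (PySem.Dict.counter gs).items.map Prod.fst = (PySem.Dict.counter gs).keys := rfl
  have hnodR : ((PySem.Dict.counter gs).items.foldl mstep d0).keys.Nodup := by
    show ((PySem.Dict.counter gs).items.foldl
      (fun d pc => d.insert pc.1 (d.getD pc.1 0 + pc.2)) d0).keys.Nodup
    exact PySem.Dict.nodup_keys_foldl_insert_key _ Prod.fst _ _ h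
  have hkeys : (gs.foldl istep d0).keys = ((PySem.Dict.counter gs).items.foldl mstep d0).keys := by
    have hL : (gs.foldl istep d0).keys = PySem.Set.update d0.keys gs := by
      show (gs.foldl (fun d g => d.insert g (d.getD g 0 + 1)) d0).keys = _
      exact PySem.Dict.keys_foldl_insert _ _ _
    have hR : ((PySem.Dict.counter gs).items.foldl mstep d0).keys
        = PySem.Set.update d0.keys ((PySem.Dict.counter gs).items.map Prod.fst) := by
      show ((PySem.Dict.counter gs).items.foldl
        (fun d pc => d.insert pc.1 (d.getD pc.1 0 + pc.2)) d0).keys = _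
      exact PySem.Dict.keys_foldl_insert_key _ Prod.fst _ _
    rw [hL, hR, hcfst, PySem.Dict.keys_counter, set_update_ofList]
  have hgetD : ∀ k, (gs.foldl istep d0).getD k 0
      = ((PySem.Dict.counter gs).items.foldl mstep d0).getD k 0 := by
    intro k
    have hL : (gs.foldl istep d0).getD k 0 = d0.getD k 0 + (gs.count k : Int) := by
      show (gs.foldl (fun d g => d.insert g (d.getD g 0 + 1)) d0).getD k 0 = _
      exact PySem.Dict.getD_foldl_insert_add_one _ _ _
    have hnodc : ((PySem.Dict.counter gs).items.map Prod.fst).Nodup := by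
      rw [hcfst]; exact PySem.Dict.nodup_keys_counter _
    rw [hL, merge_getD _ _ _ hnodc, PySem.Dict.items_counter]
    rw [List.filter_map]
    have hcomp : ((fun p => p.1 == k) ∘ (fun k' => (k', (List.count k' gs : Int))))
        = fun x => x == k := rfl
    rw [hcomp, filter_beq_of_nodup _ _ (PySem.Set.nodup_ofList _)]
    by_cases hmem : k ∈ PySem.Set.ofList gs
    · simp [hmem]
    · have hz : gs.count k = 0 :=
        List.count_eq_zero.mpr (fun hmm => hmem ((PySem.Set.mem_ofList _ _).mpr hmm))
      simp [hmem, hz]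
  apply PySem.Dict.ext
  rw [items_eq_keys_map _ hnodL, items_eq_keys_map _ hnodR, hkeys]
  exact List.map_congr_left (fun k _ => by rw [hgetD k])

-- ===== VERDICT (by name: the statement is the Claim_ definition above) =====
theorem gcd_counts_spec : Claim_equal_gcd_counts := by
  intro numbers gcd_dict _
  unfold Spec_gcd_counts
  rw [gcd_counts_eq_foldl, gcd_counts_alt_eq_foldl, pairsB_eq_pairsA]
  have hmap : (pairsA numbers).map (fun p => gcdB p.1 p.2) = (pairsA numbers).map (fun p => gcdA p.1 p.2) := by
    exact List.map_congr_left (fun p _ => (gcdA_eq_gcdB p.1 p.2).symm)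
  rw [hmap]
  set gs := (pairsA numbers).map (fun p => gcdA p.1 p.2) with hgs
  rw [show gs.foldl istep PySem.Dict.empty = PySem.Dict.counter gs from
    PySem.Dict.foldl_insert_getD_add_one_eq_counter gs]
  rw [foldl_istep_eq_merge_counter gs _ (PySem.Dict.nodup_keys_ofList gcd_dict)]
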